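-- pv_equiv track=rewrite | github.com/vwang0/Leetcode_Solutions | Algorithms_medium/1621. Number of Sets of K Non-Overlapping Line Segments.py | numberOfSets
-- ===== SOURCE A (Python) =====
-- def numberOfSets(n, k):
--     """
--     :type n: int
--     :type k: int
--     :rtype: int
--     """
--     dp = [[0]*(k+1) for i in range(n+1)]
--     psum = [[0]*(k+1) for i in range(n+1)]
--     for K in range(k+1):
--         for N in range(n):
--             if K == 0:
--                 dp[N][K] = 1
--                 psum[N][K] = N+1
--                 continue
--             if N == 0:
--                 continue
--             dp[N][K] = dp[N-1][K] + psum[N-1][K-1]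
--             psum[N][K] = psum[N-1][K] + dp[N][K]
--     return dp[n-1][k]%1000000007
-- ===== SOURCE B (Python) =====
-- def numberOfSets(n, k):
--     # Closed form: the answer is C(n+k-1, 2k) mod 1e9+7, computed by an O(k)
--     # multiplicative binomial evaluation instead of the O(n*k) DP table.
--     MOD = 1000000007
--     m = n + k - 1
--     r = 1
--     for i in range(2 * k):
--         r = r * (m - i) // (i + 1)
--     return r % MOD
-- ===== Notes on version B (the rewrite author's own statement) =====
-- stated objective: faster
-- what changed: Replaces the O(n*k) prefix-sum DP over an (n+1)x(k+1) table by the closed-form binomial C(n+k-1, 2k) mod 1e9+7, evaluated with an O(k) multiplicative loop.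
-- intended difference: On the single degenerate input n=0, k=0 A returns 0 (its dp[n-1] read wraps to the untouched row via Python's negative indexing), while B returns 1, the intended count of choosing zero segments (consistent with A's own value 1 for every n>=1, k=0). — e.g. on numberOfSets(0, 0): A returns 0, B returns 1
import Mathlib
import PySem

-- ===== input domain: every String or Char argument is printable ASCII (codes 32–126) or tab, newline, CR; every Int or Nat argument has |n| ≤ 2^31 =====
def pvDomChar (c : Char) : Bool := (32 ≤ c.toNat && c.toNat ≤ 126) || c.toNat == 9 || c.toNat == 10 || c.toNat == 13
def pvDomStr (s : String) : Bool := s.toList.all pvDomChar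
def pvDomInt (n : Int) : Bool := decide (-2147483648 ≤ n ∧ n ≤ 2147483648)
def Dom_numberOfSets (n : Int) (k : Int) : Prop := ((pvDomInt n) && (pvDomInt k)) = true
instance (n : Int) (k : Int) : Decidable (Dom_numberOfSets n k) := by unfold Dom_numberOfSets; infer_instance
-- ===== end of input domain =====

-- B replaces A's O(n*k) DP table by the closed-form binomial C(n+k-1, 2k) mod 1e9+7 in O(k).

-- ===== PORT A =====
-- m[i][j] read / write (Python indexing; all loop indices are in range, the final read may be negative)
def pvGet2 (m : List (List Int)) (i j : Int) : Int :=
  PySem.List.pyGetD (PySem.List.pyGetD m i []) j 0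

def pvSet2 (m : List (List Int)) (i j : Int) (v : Int) : List (List Int) :=
  PySem.List.pySetD m i (PySem.List.pySetD (PySem.List.pyGetD m i []) j v)

def numberOfSets (n : Int) (k : Int) : Int :=
  let dp0 := (PySem.List.pyRange 0 (n+1) 1).map (fun _ => PySem.List.pyRepeat [(0:Int)] (k+1))
  let psum0 := (PySem.List.pyRange 0 (n+1) 1).map (fun _ => PySem.List.pyRepeat [(0:Int)] (k+1))
  let st := (PySem.List.pyRange 0 (k+1) 1).foldl (fun st K =>
      (PySem.List.pyRange 0 n 1).foldl (fun st N =>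
        if K = 0 then
          (pvSet2 st.1 N K 1, pvSet2 st.2 N K (N+1))
        else if N = 0 then st
        else
          let dp' := pvSet2 st.1 N K (pvGet2 st.1 (N-1) K + pvGet2 st.2 (N-1) (K-1))
          (dp', pvSet2 st.2 N K (pvGet2 st.2 (N-1) K + pvGet2 dp' N K))
      ) st) (dp0, psum0)
  PySem.Int.mod (pvGet2 st.1 (n-1) k) 1000000007

-- ===== PORT B =====
def numberOfSets_alt (n : Int) (k : Int) : Int :=
  let m := n + k - 1
  let r := (PySem.List.pyRange 0 (2*k) 1).foldl
      (fun r i => PySem.Int.floordiv (r * (m - i)) (i + 1)) 1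
  PySem.Int.mod r 1000000007

-- ===== PRECONDITION & SPEC =====
-- A raises IndexError when n < 0 (dp[n-1] on an empty table) or k < 0 (rows are empty lists).
def Pre_numberOfSets (n : Int) (k : Int) : Prop := 0 ≤ n ∧ 0 ≤ k
instance (n : Int) (k : Int) : Decidable (Pre_numberOfSets n k) := by unfold Pre_numberOfSets; infer_instance
def pvWitness_numberOfSets : Int × Int := (4, 2)

-- On the single degenerate input n=0, k=0 A returns 0 (its dp[n-1] read wraps to the untouched row
-- via Python's negative indexing), while B returns 1, the intended count of choosing zero segments
-- (consistent with A's own value 1 for every n >= 1, k = 0).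
def D_numberOfSets (n : Int) (k : Int) : Prop := n = 0 ∧ k = 0
instance (n : Int) (k : Int) : Decidable (D_numberOfSets n k) := by unfold D_numberOfSets; infer_instance

def Spec_numberOfSets (n : Int) (k : Int) (out : Int) : Prop :=
  ¬ D_numberOfSets n k → out = numberOfSets_alt n k
instance (n : Int) (k : Int) (out : Int) : Decidable (Spec_numberOfSets n k out) := by unfold Spec_numberOfSets; infer_instance

def pvDiffWitness_numberOfSets : Int × Int := (0, 0)
def pvDiffWitnessOut_numberOfSets : Int × Int := (0, 1)

-- ===== CLAIM (what is proved, stated in full; the proofs are below) =====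
def Claim_unchanged_numberOfSets : Prop := ∀ (n : Int) (k : Int), Dom_numberOfSets n k → Pre_numberOfSets n k → Spec_numberOfSets n k (numberOfSets n k)
def Claim_changed_numberOfSets : Prop := Dom_numberOfSets (pvDiffWitness_numberOfSets.1) (pvDiffWitness_numberOfSets.2) ∧ Pre_numberOfSets (pvDiffWitness_numberOfSets.1) (pvDiffWitness_numberOfSets.2) ∧ D_numberOfSets (pvDiffWitness_numberOfSets.1) (pvDiffWitness_numberOfSets.2) ∧ numberOfSets (pvDiffWitness_numberOfSets.1) (pvDiffWitness_numberOfSets.2) = pvDiffWitnessOut_numberOfSets.1 ∧ numberOfSets_alt (pvDiffWitness_numberOfSets.1) (pvDiffWitness_numberOfSets.2) = pvDiffWitnessOut_numberOfSets.2 ∧ pvDiffWitnessOut_numberOfSets.1 ≠ pvDiffWitnessOut_numberOfSets.2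
def Claim_exact_numberOfSets : Prop := ∀ (n : Int) (k : Int), Dom_numberOfSets n k → Pre_numberOfSets n k → D_numberOfSets n k → numberOfSets n k ≠ numberOfSets_alt n k

-- ===== LEMMAS AND PROOFS =====

-- B's fold computes the binomial coefficient: after t steps, r = C(m, t).
theorem combFold (m : ℕ) (t : ℕ) :
    (PySem.List.pyRange 0 (t : Int) 1).foldl
      (fun r i => PySem.Int.floordiv (r * ((m : Int) - i)) (i + 1)) 1
    = (Nat.choose m t : Int) := by
  induction t with
  | zero => simp [PySem.List.pyRange_one_eq_nil]
  | succ t ih =>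
      have h : (((t : ℕ) + 1 : ℕ) : Int) = ((t : ℕ) : Int) + 1 := by push_cast; ring
      rw [h, PySem.List.pyRange_one_succ_right (by positivity), List.foldl_append, ih]
      simp only [List.foldl_cons, List.foldl_nil]
      by_cases hlt : t < m
      · have hm : ((m : Int) - (t : Int)) = ((m - t : ℕ) : Int) := by
          push_cast [Nat.cast_sub hlt.le]; ring
        rw [hm]
        have hnat : Nat.choose m t * (m - t) = Nat.choose m (t+1) * (t+1) :=
          (Nat.choose_succ_right_eq m t).symm
        have hnum : (Nat.choose m t : Int) * ((m - t : ℕ) : Int)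
            = ((Nat.choose m (t+1) * (t+1) : ℕ) : Int) := by
          exact_mod_cast congrArg (fun x : ℕ => (x : Int)) hnat
        rw [hnum]
        have ht1 : ((t : ℕ) : Int) + 1 = (((t+1 : ℕ)) : Int) := by push_cast; ring
        rw [ht1, PySem.Int.floordiv_natCast]
        norm_num
      · have hz : (Nat.choose m t : Int) * ((m : Int) - (t : Int)) = 0 := by
          rcases Nat.lt_or_ge m t with h' | h'
          · simp [Nat.choose_eq_zero_of_lt h']
          · have : m = t := by omega
            simp [this]
        rw [hz]
        have : Nat.choose m (t+1) = 0 := Nat.choose_eq_zero_of_lt (by omega)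
        rw [this, PySem.Int.floordiv_eq_ediv_of_pos (by positivity)]
        simp


-- ----- A-side machinery: the DP table is an explicit matrix of binomial coefficients -----

-- the inner loop body of A (named for the proofs; definitionally the inline lambda in numberOfSets)
def pvBody (K : Int) (st : List (List Int) × List (List Int)) (N : Int) :
    List (List Int) × List (List Int) :=
  if K = 0 then
    (pvSet2 st.1 N K 1, pvSet2 st.2 N K (N+1))
  else if N = 0 then st
  else
    let dp' := pvSet2 st.1 N K (pvGet2 st.1 (N-1) K + pvGet2 st.2 (N-1) (K-1))
    (dp', pvSet2 st.2 N K (pvGet2 st.2 (N-1) K + pvGet2 dp' N K))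

def pvMk2 (nn kk : ℕ) (f : ℕ → ℕ → Int) : List (List Int) :=
  (List.range (nn+1)).map (fun N => (List.range (kk+1)).map (fun K => f N K))

def pvDP (N K : ℕ) : Int := (Nat.choose (N+K) (2*K) : Int)
def pvPS (N K : ℕ) : Int := (Nat.choose (N+K+1) (2*K+1) : Int)

-- expected matrix contents after the outer loop has fully processed columns < t
-- and the inner loop has processed rows < s of column t
def pvF (nn t s N K : ℕ) : Int :=
  if N < nn ∧ (K < t ∨ (K = t ∧ N < s)) then pvDP N K else 0
def pvG (nn t s N K : ℕ) : Int :=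
  if N < nn ∧ (K < t ∨ (K = t ∧ N < s)) then pvPS N K else 0

theorem pvGet2_mk2 (nn kk : ℕ) (f : ℕ → ℕ → Int) (i j : ℕ)
    (hi : i < nn+1) (hj : j < kk+1) :
    pvGet2 (pvMk2 nn kk f) (i : Int) (j : Int) = f i j := by
  simp [pvGet2, pvMk2, PySem.List.pyGetD_natCast, List.getD, hi, hj]

theorem pvMapRangeSet {α : Type} (n : ℕ) (f : ℕ → α) (i : ℕ) (v : α) :
    ((List.range n).map f).set i v
      = (List.range n).map (fun a => if a = i then v else f a) := by
  apply List.ext_getElem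
  · simp
  · intro a h1 h2
    simp only [List.length_set, List.length_map, List.length_range] at h1
    by_cases hai : a = i
    · subst hai; simp [List.getElem_set]
    · simp [List.getElem_set, hai, Ne.symm hai]

theorem pvSet2_mk2 (nn kk : ℕ) (f : ℕ → ℕ → Int) (i j : ℕ)
    (hi : i < nn+1) (hj : j < kk+1) (v : Int) :
    pvSet2 (pvMk2 nn kk f) (i : Int) (j : Int) v
      = pvMk2 nn kk (fun N K => if N = i ∧ K = j then v else f N K) := by
  simp only [pvSet2, pvMk2, PySem.List.pySetD_natCast, PySem.List.pyGetD_natCast]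
  have hlen : i < (List.map (fun N => List.map (fun K => f N K) (List.range (kk+1)))
      (List.range (nn+1))).length := by simp [hi]
  rw [List.getD_eq_getElem _ _ hlen]
  simp only [List.getElem_map, List.getElem_range]
  rw [pvMapRangeSet, pvMapRangeSet]
  apply List.map_congr_left
  intro a _
  by_cases hai : a = i
  · subst hai; simp
  · simp [hai]

theorem pvPascal1 (a b : ℕ) : pvDP (a+1) (b+1) = pvDP a (b+1) + pvPS a b := by
  have h : (a+b+1+1).choose (2*b+1+1) = (a+b+1).choose (2*b+1) + (a+b+1).choose (2*b+1+1) :=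
    Nat.choose_succ_succ _ _
  unfold pvDP pvPS
  have e1 : a+1+(b+1) = a+b+1+1 := by ring
  have e2 : 2*(b+1) = 2*b+1+1 := by ring
  have e3 : a+(b+1) = a+b+1 := by ring
  rw [e1, e2, e3, h]
  push_cast; ring

theorem pvPascal2 (a b : ℕ) : pvPS (a+1) (b+1) = pvPS a (b+1) + pvDP (a+1) (b+1) := by
  have h : (a+b+2+1).choose (2*b+2+1) = (a+b+2).choose (2*b+2) + (a+b+2).choose (2*b+2+1) :=
    Nat.choose_succ_succ _ _
  unfold pvDP pvPS
  have e1 : a+1+(b+1)+1 = a+b+2+1 := by ring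
  have e5 : a+1+(b+1) = a+b+2 := by ring
  have e3 : a+(b+1)+1 = a+b+2 := by ring
  have e4 : 2*(b+1) = 2*b+2 := by ring
  rw [e1, e5, e3, e4, h]
  push_cast; ring

theorem pvInner (nn kk t : ℕ) (ht : t ≤ kk) :
    ∀ s, s ≤ nn →
    (PySem.List.pyRange 0 (s : Int) 1).foldl (pvBody (t : Int))
      (pvMk2 nn kk (pvF nn t 0), pvMk2 nn kk (pvG nn t 0))
    = (pvMk2 nn kk (pvF nn t s), pvMk2 nn kk (pvG nn t s)) := by
  intro s
  induction s with
  | zero => intro _; simp [PySem.List.pyRange_one_eq_nil]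
  | succ s ih =>
    intro hs1
    have hs : s < nn := by omega
    have hcast : ((s+1 : ℕ) : Int) = (s : Int) + 1 := by push_cast; ring
    rw [hcast, PySem.List.pyRange_one_succ_right (by positivity), List.foldl_append,
        ih (by omega)]
    simp only [List.foldl_cons, List.foldl_nil]
    by_cases ht0 : t = 0
    · subst ht0
      simp only [pvBody, Nat.cast_zero, eq_self_iff_true, if_true]
      have h1 := pvSet2_mk2 nn kk (pvF nn 0 s) s 0 (by omega) (by omega) 1
      have h2 := pvSet2_mk2 nn kk (pvG nn 0 s) s 0 (by omega) (by omega) ((s : Int) + 1)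
      push_cast at h1 h2
      rw [h1, h2]
      have hF : (fun N K => if N = s ∧ K = 0 then (1 : Int) else pvF nn 0 s N K)
          = pvF nn 0 (s+1) := by
        funext N K
        simp only [pvF]
        by_cases hNK : N = s ∧ K = 0
        · obtain ⟨rfl, rfl⟩ := hNK
          rw [if_pos (⟨rfl, rfl⟩ : _ ∧ _), if_pos ⟨hs, Or.inr ⟨rfl, by omega⟩⟩]
          simp [pvDP]
        · rw [if_neg hNK]
          have hiff : (N < nn ∧ (K < 0 ∨ K = 0 ∧ N < s))
              ↔ (N < nn ∧ (K < 0 ∨ K = 0 ∧ N < s+1)) := by omega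
          simp only [hiff]
      have hG : (fun N K => if N = s ∧ K = 0 then (s : Int) + 1 else pvG nn 0 s N K)
          = pvG nn 0 (s+1) := by
        funext N K
        simp only [pvG]
        by_cases hNK : N = s ∧ K = 0
        · obtain ⟨rfl, rfl⟩ := hNK
          rw [if_pos (⟨rfl, rfl⟩ : _ ∧ _), if_pos ⟨hs, Or.inr ⟨rfl, by omega⟩⟩]
          simp [pvPS, Nat.choose_one_right]
        · rw [if_neg hNK]
          have hiff : (N < nn ∧ (K < 0 ∨ K = 0 ∧ N < s))
              ↔ (N < nn ∧ (K < 0 ∨ K = 0 ∧ N < s+1)) := by omega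
          simp only [hiff]
      rw [hF, hG]
    · have htZ : ((t : ℕ) : Int) ≠ 0 := by exact_mod_cast ht0
      by_cases hs0 : s = 0
      · subst hs0
        simp only [pvBody, Nat.cast_zero, if_neg htZ, eq_self_iff_true, if_true]
        have hF : pvF nn t 0 = pvF nn t 1 := by
          funext N K
          simp only [pvF]
          by_cases hc : N < nn ∧ (K < t ∨ K = t ∧ N < 0)
          · rw [if_pos hc, if_pos ⟨hc.1, by omega⟩]
          · by_cases hc2 : N < nn ∧ (K < t ∨ K = t ∧ N < 1)
            · have hK : K = t ∧ N = 0 := by omega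
              obtain ⟨rfl, rfl⟩ := hK
              rw [if_neg hc, if_pos hc2]
              simp only [pvDP, Nat.zero_add]
              rw [Nat.choose_eq_zero_of_lt (by omega)]
              simp
            · rw [if_neg hc, if_neg hc2]
        have hG : pvG nn t 0 = pvG nn t 1 := by
          funext N K
          simp only [pvG]
          by_cases hc : N < nn ∧ (K < t ∨ K = t ∧ N < 0)
          · rw [if_pos hc, if_pos ⟨hc.1, by omega⟩]
          · by_cases hc2 : N < nn ∧ (K < t ∨ K = t ∧ N < 1)
            · have hK : K = t ∧ N = 0 := by omega
              obtain ⟨rfl, rfl⟩ := hK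
              rw [if_neg hc, if_pos hc2]
              simp only [pvPS, Nat.zero_add]
              rw [Nat.choose_eq_zero_of_lt (by omega)]
              simp
            · rw [if_neg hc, if_neg hc2]
        rw [← hF, ← hG]
      · obtain ⟨a, rfl⟩ : ∃ a, s = a+1 := ⟨s-1, by omega⟩
        obtain ⟨b, rfl⟩ : ∃ b, t = b+1 := ⟨t-1, by omega⟩
        have hNZ : (((a+1 : ℕ)) : Int) ≠ 0 := by exact_mod_cast Nat.succ_ne_zero a
        simp only [pvBody, if_neg htZ, if_neg hNZ]
        have hN1 : (((a+1 : ℕ)) : Int) - 1 = ((a : ℕ) : Int) := by push_cast; ring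
        have hK1 : (((b+1 : ℕ)) : Int) - 1 = ((b : ℕ) : Int) := by push_cast; ring
        rw [hN1, hK1]
        have ha1 : a+1 < nn+1 := by omega
        have hb1 : b+1 < kk+1 := by omega
        -- the three reads from the pre-state
        rw [pvGet2_mk2 nn kk (pvF nn (b+1) (a+1)) a (b+1) (by omega) hb1,
            pvGet2_mk2 nn kk (pvG nn (b+1) (a+1)) a b (by omega) (by omega),
            pvGet2_mk2 nn kk (pvG nn (b+1) (a+1)) a (b+1) (by omega) hb1]
        have hcond : a < nn ∧ (b+1 < b+1 ∨ (b+1 = b+1 ∧ a < a+1)) := by omega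
        have hcond' : a < nn ∧ (b < b+1 ∨ (b = b+1 ∧ a < a+1)) := by omega
        have hfa : pvF nn (b+1) (a+1) a (b+1) = pvDP a (b+1) := by
          unfold pvF; rw [if_pos hcond]
        have hgb : pvG nn (b+1) (a+1) a b = pvPS a b := by
          unfold pvG; rw [if_pos hcond']
        have hga : pvG nn (b+1) (a+1) a (b+1) = pvPS a (b+1) := by
          unfold pvG; rw [if_pos hcond]
        rw [hfa, hgb, hga, ← pvPascal1]
        -- the dp write, then the read-back of the written cell
        rw [pvSet2_mk2 nn kk (pvF nn (b+1) (a+1)) (a+1) (b+1) ha1 hb1,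
            pvGet2_mk2 nn kk _ (a+1) (b+1) ha1 hb1]
        rw [if_pos ⟨rfl, rfl⟩]
        rw [pvSet2_mk2 nn kk (pvG nn (b+1) (a+1)) (a+1) (b+1) ha1 hb1, ← pvPascal2]
        have hF : (fun N K => if N = a+1 ∧ K = b+1 then pvDP (a+1) (b+1)
              else pvF nn (b+1) (a+1) N K) = pvF nn (b+1) (a+2) := by
          funext N K
          unfold pvF
          by_cases hNK : N = a+1 ∧ K = b+1
          · obtain ⟨rfl, rfl⟩ := hNK
            have hc2 : a+1 < nn ∧ (b+1 < b+1 ∨ (b+1 = b+1 ∧ a+1 < a+2)) := by omega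
            rw [if_pos (⟨rfl, rfl⟩ : _ ∧ _), if_pos hc2]
          · rw [if_neg hNK]
            have hiff : (N < nn ∧ (K < b+1 ∨ K = b+1 ∧ N < a+1))
                ↔ (N < nn ∧ (K < b+1 ∨ K = b+1 ∧ N < a+2)) := by omega
            simp only [hiff]
        have hG : (fun N K => if N = a+1 ∧ K = b+1 then pvPS (a+1) (b+1)
              else pvG nn (b+1) (a+1) N K) = pvG nn (b+1) (a+2) := by
          funext N K
          unfold pvG
          by_cases hNK : N = a+1 ∧ K = b+1
          · obtain ⟨rfl, rfl⟩ := hNK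
            have hc2 : a+1 < nn ∧ (b+1 < b+1 ∨ (b+1 = b+1 ∧ a+1 < a+2)) := by omega
            rw [if_pos (⟨rfl, rfl⟩ : _ ∧ _), if_pos hc2]
          · rw [if_neg hNK]
            have hiff : (N < nn ∧ (K < b+1 ∨ K = b+1 ∧ N < a+1))
                ↔ (N < nn ∧ (K < b+1 ∨ K = b+1 ∧ N < a+2)) := by omega
            simp only [hiff]
        rw [hF, hG]

theorem pvOuter (nn kk : ℕ) :
    ∀ t, t ≤ kk+1 →
    (PySem.List.pyRange 0 (t : Int) 1).foldl
      (fun st K => (PySem.List.pyRange 0 (nn : Int) 1).foldl (pvBody K) st)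
      (pvMk2 nn kk (pvF nn 0 0), pvMk2 nn kk (pvG nn 0 0))
    = (pvMk2 nn kk (pvF nn t 0), pvMk2 nn kk (pvG nn t 0)) := by
  intro t
  induction t with
  | zero => intro _; simp [PySem.List.pyRange_one_eq_nil]
  | succ t ihh =>
    intro ht1
    have hcast : ((t+1 : ℕ) : Int) = (t : Int) + 1 := by push_cast; ring
    rw [hcast, PySem.List.pyRange_one_succ_right (by positivity), List.foldl_append,
        ihh (by omega)]
    simp only [List.foldl_cons, List.foldl_nil]
    rw [pvInner nn kk t (by omega) nn le_rfl]
    have hF : pvF nn t nn = pvF nn (t+1) 0 := by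
      funext N K
      simp only [pvF]
      by_cases h : N < nn ∧ (K < t ∨ (K = t ∧ N < nn))
      · rw [if_pos h, if_pos ⟨h.1, by omega⟩]
      · rw [if_neg h, if_neg (by intro h2; exact h ⟨h2.1, by omega⟩)]
    have hG : pvG nn t nn = pvG nn (t+1) 0 := by
      funext N K
      simp only [pvG]
      by_cases h : N < nn ∧ (K < t ∨ (K = t ∧ N < nn))
      · rw [if_pos h, if_pos ⟨h.1, by omega⟩]
      · rw [if_neg h, if_neg (by intro h2; exact h ⟨h2.1, by omega⟩)]
    rw [hF, hG]

-- A in terms of the machinery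
theorem numberOfSets_eq (nn kk : ℕ) :
    numberOfSets (nn : Int) (kk : Int)
      = PySem.Int.mod (pvGet2 (pvMk2 nn kk (pvF nn (kk+1) 0)) ((nn : Int) - 1) (kk : Int))
          1000000007 := by
  have hinit : (PySem.List.pyRange 0 ((nn : Int)+1) 1).map
        (fun _ => PySem.List.pyRepeat [(0:Int)] ((kk : Int)+1))
      = pvMk2 nn kk (fun _ _ => 0) := by
    rw [PySem.List.pyRepeat_singleton]
    have hk1 : ((kk : Int)+1).toNat = kk+1 := by omega
    have hn1 : (((nn : Int)+1) - 0).toNat = nn+1 := by omega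
    simp [pvMk2, List.map_const', PySem.List.length_pyRange_one, hk1, hn1]
  have hzF : pvMk2 nn kk (fun _ _ => (0:Int)) = pvMk2 nn kk (pvF nn 0 0) := by
    unfold pvMk2
    apply List.map_congr_left
    intro N _
    apply List.map_congr_left
    intro K _
    unfold pvF
    rw [if_neg (by omega)]
  have hzG : pvMk2 nn kk (fun _ _ => (0:Int)) = pvMk2 nn kk (pvG nn 0 0) := by
    unfold pvMk2
    apply List.map_congr_left
    intro N _
    apply List.map_congr_left
    intro K _
    unfold pvG
    rw [if_neg (by omega)]
  have h := pvOuter nn kk (kk+1) le_rfl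
  have hcast : (((kk+1 : ℕ)) : Int) = (kk : Int) + 1 := by push_cast; ring
  rw [hcast] at h
  calc numberOfSets (nn : Int) (kk : Int)
      = PySem.Int.mod (pvGet2 ((PySem.List.pyRange 0 ((kk : Int)+1) 1).foldl
          (fun st K => (PySem.List.pyRange 0 (nn : Int) 1).foldl (pvBody K) st)
          ((PySem.List.pyRange 0 ((nn : Int)+1) 1).map
              (fun _ => PySem.List.pyRepeat [(0:Int)] ((kk : Int)+1)),
           (PySem.List.pyRange 0 ((nn : Int)+1) 1).map
              (fun _ => PySem.List.pyRepeat [(0:Int)] ((kk : Int)+1)))).1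
          ((nn : Int) - 1) (kk : Int)) 1000000007 := rfl
    _ = PySem.Int.mod (pvGet2 ((PySem.List.pyRange 0 ((kk : Int)+1) 1).foldl
          (fun st K => (PySem.List.pyRange 0 (nn : Int) 1).foldl (pvBody K) st)
          (pvMk2 nn kk (pvF nn 0 0), pvMk2 nn kk (pvG nn 0 0))).1
          ((nn : Int) - 1) (kk : Int)) 1000000007 := by
            have hpair : ((pvMk2 nn kk (fun _ _ => (0:Int)), pvMk2 nn kk (fun _ _ => (0:Int)))
                  : List (List Int) × List (List Int))
                = (pvMk2 nn kk (pvF nn 0 0), pvMk2 nn kk (pvG nn 0 0)) :=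
              congrArg₂ Prod.mk hzF hzG
            rw [hinit, hpair]
    _ = PySem.Int.mod (pvGet2 (pvMk2 nn kk (pvF nn (kk+1) 0)) ((nn : Int) - 1) (kk : Int))
          1000000007 := by rw [h]

-- ===== VERDICT (by name: the statement is the Claim_ definition above) =====
theorem numberOfSets_spec : Claim_unchanged_numberOfSets := by
  intro n k _ hpre hnd
  obtain ⟨hn, hk⟩ := hpre
  obtain ⟨nn, rfl⟩ : ∃ nn : ℕ, n = (nn : Int) := ⟨n.toNat, (Int.toNat_of_nonneg hn).symm⟩
  obtain ⟨kk, rfl⟩ : ∃ kk : ℕ, k = (kk : Int) := ⟨k.toNat, (Int.toNat_of_nonneg hk).symm⟩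
  rw [numberOfSets_eq]
  simp only [numberOfSets_alt]
  by_cases hnn : nn = 0
  · subst hnn
    have hkk : 1 ≤ kk := by
      by_contra hkk
      exact hnd ⟨rfl, by omega⟩
    -- A side: the dp[-1] read hits the single untouched all-zero row
    have hA : pvGet2 (pvMk2 0 kk (pvF 0 (kk+1) 0)) ((0:ℕ) - 1 : Int) (kk : Int) = 0 := by
      have hm1 : (((0:ℕ) : Int) - 1) = (-1 : Int) := by omega
      rw [hm1]
      unfold pvGet2 pvMk2
      rw [List.range_one, List.map_singleton]
      rw [show ([List.map (fun K => pvF 0 (kk+1) 0 0 K) (List.range (kk+1))] : List (List Int))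
            = [] ++ [List.map (fun K => pvF 0 (kk+1) 0 0 K) (List.range (kk+1))] from rfl,
          PySem.List.pyGetD_neg_one_append_singleton]
      simp only [PySem.List.pyGetD_natCast]
      rw [List.getD_eq_getElem _ _ (by simp [Nat.lt_succ_self])]
      simp only [List.getElem_map, List.getElem_range]
      unfold pvF
      rw [if_neg (by omega)]
    rw [hA]
    -- B side: C(kk-1, 2kk) = 0
    have hm : ((0:ℕ) : Int) + (kk : Int) - 1 = (((kk-1 : ℕ)) : Int) := by omega
    have h2k : (2 * ((kk : ℕ) : Int)) = (((2*kk : ℕ)) : Int) := by push_cast; ring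
    rw [hm, h2k, combFold]
    rw [Nat.choose_eq_zero_of_lt (by omega)]
    simp
  · -- n ≥ 1: both sides are C(nn-1+kk, 2kk) mod 1e9+7
    have hidx : ((nn : ℕ) : Int) - 1 = (((nn-1 : ℕ)) : Int) := by omega
    rw [hidx, pvGet2_mk2 nn kk (pvF nn (kk+1) 0) (nn-1) kk (by omega) (by omega)]
    have hF : pvF nn (kk+1) 0 (nn-1) kk = pvDP (nn-1) kk := by
      unfold pvF
      rw [if_pos ⟨by omega, Or.inl (by omega)⟩]
    rw [hF]
    have hm : ((nn : ℕ) : Int) + ((kk : ℕ) : Int) - 1 = (((nn-1+kk : ℕ)) : Int) := by omega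
    have h2k : (2 * ((kk : ℕ) : Int)) = (((2*kk : ℕ)) : Int) := by push_cast; ring
    rw [hm, h2k, combFold]
    unfold pvDP
    rfl

theorem numberOfSets_changed : Claim_changed_numberOfSets := by
  unfold Claim_changed_numberOfSets; decide

theorem numberOfSets_tight : Claim_exact_numberOfSets := by
  unfold Claim_exact_numberOfSets
  intro n k _ _ hD
  obtain ⟨rfl, rfl⟩ := hD
  decide
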